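-- pv_equiv track=rewrite | github.com/kirtisharma0691-crypto/QA-Agents | examples/comprehensive_demo.py | create_card_grid
-- ===== SOURCE A (Python) =====
-- from typing import Any, Dict, List
--
-- def create_card_grid(width: int = 90, height: int = 60) -> List[List[int]]:
--     """Create a grid of card-like elements."""
--     image = [[245] * width for _ in range(height)]
--
--     cards_per_row = 3
--     card_width = 25
--     card_height = 25
--     gap = 5
--
--     for i in range(6):
--         row = i // cards_per_row
--         col = i % cards_per_row
--
--         start_x = gap + col * (card_width + gap)
--         start_y = gap + row * (card_height + gap)
--
--         if start_y + card_height >= height: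
--             break
--
--         for y in range(start_y, min(start_y + card_height, height)):
--             for x in range(start_x, min(start_x + card_width, width)):
--                 if y == start_y or y == start_y + card_height - 1 or x == start_x or x == start_x + card_width - 1:
--                     image[y][x] = 150
--                 elif y < start_y + 10:
--                     image[y][x] = 200
--                 else:
--                     image[y][x] = 250
--
--     return image
-- ===== SOURCE B (Python) =====
-- from typing import List
--
--
-- def create_card_grid(width: int = 90, height: int = 60) -> List[List[int]]:
--     """Create a grid of card-like elements (shape-fill decomposition)."""
--     image = [[245] * width for _ in range(height)]
--
--     for i in range(6):
--         row, col = divmod(i, 3)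
--         sx = 5 + col * 30
--         sy = 5 + row * 30
--
--         if sy + 25 >= height:
--             break
--
--         x_end = min(sx + 25, width)
--
--         # interior bands: header rows then body rows
--         for y in range(sy, sy + 25):
--             v = 200 if y < sy + 10 else 250
--             for x in range(sx, x_end):
--                 image[y][x] = v
--
--         # borders painted last overwrite the band values
--         for x in range(sx, x_end):          # top and bottom rows
--             image[sy][x] = 150
--             image[sy + 24][x] = 150
--         for y in range(sy, sy + 25):        # left and right columns (clamped)
--             if sx < x_end:
--                 image[y][sx] = 150
--             if sx + 24 < x_end:
--                 image[y][sx + 24] = 150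
--
--     return image
-- ===== Notes on version B (the rewrite author's own statement) =====
-- stated objective: alternative
-- what changed: Replaces the per-pixel if/elif/else classification inside the card rectangle by shape fills: two interior band fills per card followed by explicit top/bottom-row and left/right-column border passes that overwrite last, keeping the same outer loop, break and x-clamping.
import Mathlib
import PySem

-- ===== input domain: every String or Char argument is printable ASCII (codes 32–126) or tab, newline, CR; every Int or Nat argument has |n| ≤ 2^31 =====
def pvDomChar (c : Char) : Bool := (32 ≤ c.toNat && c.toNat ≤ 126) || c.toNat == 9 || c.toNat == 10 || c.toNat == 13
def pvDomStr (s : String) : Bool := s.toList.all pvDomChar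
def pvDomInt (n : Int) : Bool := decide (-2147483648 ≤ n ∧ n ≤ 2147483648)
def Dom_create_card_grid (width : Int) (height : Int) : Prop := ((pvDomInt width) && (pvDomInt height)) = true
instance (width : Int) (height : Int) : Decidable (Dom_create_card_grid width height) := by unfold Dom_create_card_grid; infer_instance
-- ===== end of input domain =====

-- B replaces A's per-pixel if/elif/else by band fills plus border passes painted last (same outer loop, break and clamping); objective: alternative decomposition, same cost.

-- image[y][x] = v  (y, x always in range at every use site in both programs)
def pvSetCell (g : List (List Int)) (y x v : Int) : List (List Int) :=
  PySem.List.pySetD g y (PySem.List.pySetD (PySem.List.pyGetD g y []) x v)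

-- ===== PORT A =====
-- the body of A's card-drawing loops for one card
def pvCardA (width height sx sy : Int) (g : List (List Int)) : List (List Int) :=
  (PySem.List.pyRange sy (min (sy + 25) height) 1).foldl (fun g y =>
    (PySem.List.pyRange sx (min (sx + 25) width) 1).foldl (fun g x =>
      pvSetCell g y x
        (if y = sy ∨ y = sy + 25 - 1 ∨ x = sx ∨ x = sx + 25 - 1 then 150
         else if y < sy + 10 then 200 else 250)) g) g

-- for i in range(6): … with break
def pvLoopA (width height : Int) : List Int → List (List Int) → List (List Int)
  | [], g => g
  | i :: rest, g =>
    let row := PySem.Int.floordiv i 3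
    let col := PySem.Int.mod i 3
    let sx := 5 + col * (25 + 5)
    let sy := 5 + row * (25 + 5)
    if sy + 25 ≥ height then g
    else pvLoopA width height rest (pvCardA width height sx sy g)

def create_card_grid (width : Int) (height : Int) : List (List Int) :=
  -- [[245]*width for _ in range(height)]  ([v]*n is empty for n ≤ 0, as is range(n): .toNat is exact here)
  pvLoopA width height (PySem.List.pyRange 0 6 1)
    (List.replicate height.toNat (List.replicate width.toNat (245 : Int)))

-- ===== PORT B =====
-- B's card: interior band fill, then top/bottom border rows, then left/right border columns
def pvCardB (width sx sy : Int) (g : List (List Int)) : List (List Int) :=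
  let xEnd := min (sx + 25) width
  let g1 := (PySem.List.pyRange sy (sy + 25) 1).foldl (fun g y =>
      let v : Int := if y < sy + 10 then 200 else 250
      (PySem.List.pyRange sx xEnd 1).foldl (fun g x => pvSetCell g y x v) g) g
  let g2 := (PySem.List.pyRange sx xEnd 1).foldl (fun g x =>
      pvSetCell (pvSetCell g sy x 150) (sy + 24) x 150) g1
  (PySem.List.pyRange sy (sy + 25) 1).foldl (fun g y =>
      let g' := if sx < xEnd then pvSetCell g y sx 150 else g
      if sx + 24 < xEnd then pvSetCell g' y (sx + 24) 150 else g') g2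

def pvLoopB (width height : Int) : List Int → List (List Int) → List (List Int)
  | [], g => g
  | i :: rest, g =>
    let row := PySem.Int.floordiv i 3
    let col := PySem.Int.mod i 3
    let sx := 5 + col * 30
    let sy := 5 + row * 30
    if sy + 25 ≥ height then g
    else pvLoopB width height rest (pvCardB width sx sy g)

def create_card_grid_alt (width : Int) (height : Int) : List (List Int) :=
  pvLoopB width height (PySem.List.pyRange 0 6 1)
    (List.replicate height.toNat (List.replicate width.toNat (245 : Int)))

-- ===== PRECONDITION & SPEC =====
def Spec_create_card_grid (width : Int) (height : Int) (out : List (List Int)) : Prop := out = create_card_grid_alt width height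
instance (width : Int) (height : Int) (out : List (List Int)) : Decidable (Spec_create_card_grid width height out) := by unfold Spec_create_card_grid; infer_instance

-- ===== CLAIM (what is proved, stated in full; the proofs are below) =====
def Claim_equal_create_card_grid : Prop := ∀ (width : Int) (height : Int), Dom_create_card_grid width height → Spec_create_card_grid width height (create_card_grid width height)

-- ===== LEMMAS AND PROOFS =====

-- read cell (r, c); 0 outside the grid (proof-only helper)
def pvGetC (g : List (List Int)) (r c : Int) : Int :=
  PySem.List.pyGetD (PySem.List.pyGetD g r ([] : List Int)) c 0

def pvRowLen (g : List (List Int)) (y : Int) : Int :=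
  ((PySem.List.pyGetD g y ([] : List Int)).length : Int)

theorem pvGetD_set {α} [Inhabited α] (l : List α) (n m : ℕ) (a : α) (d : α) :
    (l.set n a).getD m d = if m = n ∧ n < l.length then a else l.getD m d := by
  simp only [List.getD_eq_getElem?_getD, List.getElem?_set]
  split_ifs with h1 h2 h3 h3 <;> simp_all

theorem pvRowLen_setCell (g : List (List Int)) (y x v y' : Int) (hy : 0 ≤ y) (hy' : 0 ≤ y') :
    pvRowLen (pvSetCell g y x v) y' = pvRowLen g y' := by
  lift y to ℕ using hy
  lift y' to ℕ using hy'
  simp only [pvRowLen, pvSetCell, PySem.List.pyGetD_natCast, PySem.List.pySetD_natCast]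
  rw [pvGetD_set]
  split_ifs with h
  · obtain ⟨h1, h2⟩ := h
    subst h1
    simp [PySem.List.length_pySetD, List.getD_eq_getElem?_getD, List.getElem?_eq_getElem h2]
  · rfl

theorem pvGetC_setCell (g : List (List Int)) (y x v r c : Int)
    (hy0 : 0 ≤ y) (hy : y < (g.length : Int)) (hx0 : 0 ≤ x) (hx : x < pvRowLen g y)
    (hr : 0 ≤ r) (hc : 0 ≤ c) :
    pvGetC (pvSetCell g y x v) r c = if r = y ∧ c = x then v else pvGetC g r c := by
  lift y to ℕ using hy0
  lift x to ℕ using hx0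
  lift r to ℕ using hr
  lift c to ℕ using hc
  simp only [pvRowLen, pvGetC, pvSetCell, PySem.List.pyGetD_natCast, PySem.List.pySetD_natCast,
    Nat.cast_inj, Nat.cast_lt] at *
  rw [pvGetD_set]
  by_cases hry : r = y
  · subst hry
    simp only [hy, and_true, eq_self_iff_true, if_true, true_and, Nat.cast_lt] at *
    rw [pvGetD_set]
    by_cases hcx : c = x
    · rw [if_pos ⟨hcx, hx⟩]
      simp [hcx]
    · rw [if_neg (by tauto)]
      simp [hcx]
  · rw [if_neg (by tauto)]
    simp [hry]

theorem pvSetCell_length (g : List (List Int)) (y x v : Int) :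
    (pvSetCell g y x v).length = g.length := by
  simp [pvSetCell, PySem.List.length_pySetD]

theorem pvFold_length {β : Type} (body : List (List Int) → β → List (List Int))
    (xs : List β) (h1 : ∀ g, ∀ b ∈ xs, (body g b).length = g.length) :
    ∀ (g : List (List Int)), (xs.foldl body g).length = g.length := by
  induction xs with
  | nil => intro g; rfl
  | cons b xs ih =>
    intro g
    rw [List.foldl_cons, ih (fun g b hb => h1 g b (List.mem_cons_of_mem _ hb)),
      h1 g b List.mem_cons_self]

theorem pvFold_rowLen {β : Type} (body : List (List Int) → β → List (List Int))
    (xs : List β) (h2 : ∀ g, ∀ b ∈ xs, ∀ y', 0 ≤ y' → pvRowLen (body g b) y' = pvRowLen g y') :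
    ∀ (g : List (List Int)) (y' : Int), 0 ≤ y' →
      pvRowLen (xs.foldl body g) y' = pvRowLen g y' := by
  induction xs with
  | nil => intro g y' _; rfl
  | cons b xs ih =>
    intro g y' hy'
    rw [List.foldl_cons, ih (fun g b hb y' hy' => h2 g b (List.mem_cons_of_mem _ hb) y' hy') _ _ hy',
      h2 g b List.mem_cons_self _ hy']

theorem pvRowFold_getC (y : Int) (vf : Int → Int) :
    ∀ (xs : List Int) (g : List (List Int)) (r c : Int),
      0 ≤ y → y < (g.length : Int) → (∀ x ∈ xs, 0 ≤ x ∧ x < pvRowLen g y) →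
      0 ≤ r → 0 ≤ c →
      pvGetC (xs.foldl (fun g x => pvSetCell g y x (vf x)) g) r c
        = if r = y ∧ c ∈ xs then vf c else pvGetC g r c := by
  intro xs
  induction xs with
  | nil => intro g r c _ _ _ _ _; simp
  | cons x xs ih =>
    intro g r c hy0 hy hxs hr hc
    rw [List.foldl_cons,
      ih _ r c hy0 (by rw [pvSetCell_length]; exact hy)
        (fun x' hx' => by
          rw [pvRowLen_setCell _ _ _ _ _ hy0 hy0]
          exact hxs x' (List.mem_cons_of_mem _ hx'))
        hr hc,
      pvGetC_setCell _ _ _ _ _ _ hy0 hy (hxs x (List.mem_cons_self)).1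
        (hxs x (List.mem_cons_self)).2 hr hc]
    simp only [List.mem_cons]
    by_cases hry : r = y
    · subst hry
      by_cases hc1 : c ∈ xs
      · simp [hc1]
      · by_cases hcx : c = x
        · subst hcx; simp
        · simp [hc1, hcx]
    · simp [hry]

theorem pvRectFold_getC (vf : Int → Int → Int) (xs : List Int) :
    ∀ (ys : List Int) (g : List (List Int)) (r c : Int),
      (∀ y ∈ ys, 0 ≤ y ∧ y < (g.length : Int)) →
      (∀ y ∈ ys, ∀ x ∈ xs, 0 ≤ x ∧ x < pvRowLen g y) →
      0 ≤ r → 0 ≤ c →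
      pvGetC (ys.foldl (fun g y => xs.foldl (fun g x => pvSetCell g y x (vf y x)) g) g) r c
        = if r ∈ ys ∧ c ∈ xs then vf r c else pvGetC g r c := by
  intro ys
  induction ys with
  | nil => intro g r c _ _ _ _; simp
  | cons y ys ih =>
    intro g r c hys hxs hr hc
    have hy0 := (hys y List.mem_cons_self).1
    have hylen := (hys y List.mem_cons_self).2
    have hL : ∀ g', (xs.foldl (fun g x => pvSetCell g y x (vf y x)) g').length = g'.length :=
      fun g' => pvFold_length _ xs (fun g b _ => pvSetCell_length g y b (vf y b)) g'
    have hR : ∀ g' y', 0 ≤ y' →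
        pvRowLen (xs.foldl (fun g x => pvSetCell g y x (vf y x)) g') y' = pvRowLen g' y' :=
      fun g' y' hy' => pvFold_rowLen _ xs (fun g b _ y' hy' => pvRowLen_setCell g y b (vf y b) y' hy0 hy') g' y' hy'
    rw [List.foldl_cons,
      ih _ r c
        (fun y' hy' => ⟨(hys y' (List.mem_cons_of_mem _ hy')).1, by
          rw [hL]; exact (hys y' (List.mem_cons_of_mem _ hy')).2⟩)
        (fun y' hy' x hx => by
          rw [hR _ _ (hys y' (List.mem_cons_of_mem _ hy')).1]
          exact hxs y' (List.mem_cons_of_mem _ hy') x hx)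
        hr hc,
      pvRowFold_getC y (vf y) xs _ r c hy0 hylen (hxs y List.mem_cons_self) hr hc]
    simp only [List.mem_cons]
    by_cases hcx : c ∈ xs
    · by_cases hr1 : r ∈ ys
      · simp [hr1, hcx]
      · by_cases hry : r = y
        · subst hry; simp [hcx]
        · simp [hr1, hry, hcx]
    · simp [hcx]

theorem pvTBFold_getC (sy : Int) :
    ∀ (xs : List Int) (g : List (List Int)) (r c : Int),
      0 ≤ sy → sy + 24 < (g.length : Int) →
      (∀ x ∈ xs, 0 ≤ x ∧ x < pvRowLen g sy ∧ x < pvRowLen g (sy + 24)) →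
      0 ≤ r → 0 ≤ c →
      pvGetC (xs.foldl (fun g x => pvSetCell (pvSetCell g sy x 150) (sy + 24) x 150) g) r c
        = if (r = sy ∨ r = sy + 24) ∧ c ∈ xs then 150 else pvGetC g r c := by
  intro xs
  induction xs with
  | nil => intro g r c _ _ _ _ _; simp
  | cons x xs ih =>
    intro g r c hsy hlen hxs hr hc
    have hx := hxs x List.mem_cons_self
    have hsy24 : (0:Int) ≤ sy + 24 := by omega
    rw [List.foldl_cons,
      ih _ r c hsy (by rw [pvSetCell_length, pvSetCell_length]; exact hlen)
        (fun x' hx' => by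
          rw [pvRowLen_setCell _ _ _ _ _ hsy24 hsy, pvRowLen_setCell _ _ _ _ _ hsy hsy,
            pvRowLen_setCell _ _ _ _ _ hsy24 hsy24, pvRowLen_setCell _ _ _ _ _ hsy hsy24]
          exact hxs x' (List.mem_cons_of_mem _ hx'))
        hr hc,
      pvGetC_setCell _ _ _ _ _ _ hsy24 (by rw [pvSetCell_length]; omega) hx.1
        (by rw [pvRowLen_setCell _ _ _ _ _ hsy hsy24]; exact hx.2.2) hr hc,
      pvGetC_setCell _ _ _ _ _ _ hsy (by omega) hx.1 hx.2.1 hr hc]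
    simp only [List.mem_cons]
    by_cases hcx : c ∈ xs
    · by_cases hr1 : r = sy ∨ r = sy + 24
      · simp [hr1, hcx]
      · have t1 : ¬(r = sy + 24 ∧ c = x) := by tauto
        have t2 : ¬(r = sy ∧ c = x) := by tauto
        simp [hr1, hcx, t1, t2]
    · by_cases hcx2 : c = x
      · subst hcx2
        by_cases h1 : r = sy
        · simp [h1]
        · by_cases h2 : r = sy + 24 <;> simp [h1, h2]
      · simp [hcx, hcx2]

theorem pvColFold_getC (sx xEnd : Int) :
    ∀ (ys : List Int) (g : List (List Int)) (r c : Int),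
      (∀ y ∈ ys, 0 ≤ y ∧ y < (g.length : Int)) →
      (sx < xEnd → 0 ≤ sx ∧ ∀ y ∈ ys, sx < pvRowLen g y) →
      (sx + 24 < xEnd → 0 ≤ sx + 24 ∧ ∀ y ∈ ys, sx + 24 < pvRowLen g y) →
      0 ≤ r → 0 ≤ c →
      pvGetC (ys.foldl (fun g y =>
          let g' := if sx < xEnd then pvSetCell g y sx 150 else g
          if sx + 24 < xEnd then pvSetCell g' y (sx + 24) 150 else g') g) r c
        = if r ∈ ys ∧ ((c = sx ∧ sx < xEnd) ∨ (c = sx + 24 ∧ sx + 24 < xEnd)) then 150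
          else pvGetC g r c := by
  intro ys
  induction ys with
  | nil => intro g r c _ _ _ _ _; simp
  | cons y ys ih =>
    intro g r c hys h1 h2 hr hc
    have hy0 := (hys y List.mem_cons_self).1
    have hylen := (hys y List.mem_cons_self).2
    have bodyLen : ∀ (g : List (List Int)) (y : Int),
        ((fun g y =>
          let g' := if sx < xEnd then pvSetCell g y sx 150 else g
          if sx + 24 < xEnd then pvSetCell g' y (sx + 24) 150 else g') g y).length = g.length := by
      intro g y
      simp only []
      split_ifs <;> simp [pvSetCell_length]
    have bodyGet : ∀ (g : List (List Int)) (y : Int), 0 ≤ y → y < (g.length : Int) →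
        (sx < xEnd → 0 ≤ sx ∧ sx < pvRowLen g y) →
        (sx + 24 < xEnd → 0 ≤ sx + 24 ∧ sx + 24 < pvRowLen g y) →
        pvGetC ((fun g y =>
          let g' := if sx < xEnd then pvSetCell g y sx 150 else g
          if sx + 24 < xEnd then pvSetCell g' y (sx + 24) 150 else g') g y) r c
          = if r = y ∧ ((c = sx ∧ sx < xEnd) ∨ (c = sx + 24 ∧ sx + 24 < xEnd)) then 150
            else pvGetC g r c := by
      intro g y hy0' hylen' hh1 hh2
      simp only []
      by_cases e1 : sx < xEnd <;> by_cases e2 : sx + 24 < xEnd <;>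
        simp only [e1, e2, if_true, if_false]
      · rw [pvGetC_setCell _ _ _ _ _ _ hy0' (by rw [pvSetCell_length]; exact hylen')
            (hh2 e2).1 (by rw [pvRowLen_setCell _ _ _ _ _ hy0' hy0']; exact (hh2 e2).2) hr hc,
          pvGetC_setCell _ _ _ _ _ _ hy0' hylen' (hh1 e1).1 (hh1 e1).2 hr hc]
        by_cases hry : r = y
        · subst hry
          by_cases q1 : c = sx + 24
          · simp [q1, e1, e2]
          · by_cases q2 : c = sx <;> simp [q1, q2, e1, e2]
        · simp [hry]
      · rw [pvGetC_setCell _ _ _ _ _ _ hy0' hylen' (hh1 e1).1 (hh1 e1).2 hr hc]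
        by_cases hry : r = y
        · subst hry
          by_cases q2 : c = sx <;> simp [q2, e1, e2]
        · simp [hry]
      · rw [pvGetC_setCell _ _ _ _ _ _ hy0' hylen' (hh2 e2).1 (hh2 e2).2 hr hc]
        by_cases hry : r = y
        · subst hry
          by_cases q1 : c = sx + 24 <;> simp [q1, e1, e2]
        · simp [hry]
      · simp [e1, e2]
    have bodyRow : ∀ (g : List (List Int)) (y : Int), 0 ≤ y → ∀ y', 0 ≤ y' →
        pvRowLen ((fun g y =>
          let g' := if sx < xEnd then pvSetCell g y sx 150 else g
          if sx + 24 < xEnd then pvSetCell g' y (sx + 24) 150 else g') g y) y' = pvRowLen g y' := by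
      intro g y hy0' y' hy'
      simp only []
      split_ifs <;>
        simp only [pvRowLen_setCell _ _ _ _ _ hy0' hy']
    rw [List.foldl_cons]
    rw [ih _ r c
        (fun y' hy' => ⟨(hys y' (List.mem_cons_of_mem _ hy')).1, by
          rw [bodyLen]; exact (hys y' (List.mem_cons_of_mem _ hy')).2⟩)
        (fun e => ⟨(h1 e).1, fun y' hy' => by
          rw [bodyRow _ _ hy0 _ (hys y' (List.mem_cons_of_mem _ hy')).1]
          exact (h1 e).2 y' (List.mem_cons_of_mem _ hy')⟩)
        (fun e => ⟨(h2 e).1, fun y' hy' => by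
          rw [bodyRow _ _ hy0 _ (hys y' (List.mem_cons_of_mem _ hy')).1]
          exact (h2 e).2 y' (List.mem_cons_of_mem _ hy')⟩)
        hr hc,
      bodyGet g y hy0 hylen
        (fun e => ⟨(h1 e).1, (h1 e).2 y List.mem_cons_self⟩)
        (fun e => ⟨(h2 e).1, (h2 e).2 y List.mem_cons_self⟩)]
    simp only [List.mem_cons]
    by_cases hcc : (c = sx ∧ sx < xEnd) ∨ (c = sx + 24 ∧ sx + 24 < xEnd)
    · by_cases hr1 : r ∈ ys
      · simp [hr1, hcc]
      · by_cases hry : r = y <;> simp [hr1, hry, hcc]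
    · simp [hcc]

theorem pvGridExt (g1 g2 : List (List Int)) (hlen : g1.length = g2.length)
    (hrow : ∀ y : Int, 0 ≤ y → pvRowLen g1 y = pvRowLen g2 y)
    (hget : ∀ r c : Int, 0 ≤ r → 0 ≤ c → pvGetC g1 r c = pvGetC g2 r c) : g1 = g2 := by
  apply List.ext_getElem hlen
  intro n h1 h2
  have hrl : g1[n].length = g2[n].length := by
    have := hrow n (by positivity)
    simpa [pvRowLen, List.getD_eq_getElem?_getD, List.getElem?_eq_getElem h1,
      List.getElem?_eq_getElem h2] using this
  apply List.ext_getElem hrl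
  intro m hm1 hm2
  have := hget n m (by positivity) (by positivity)
  simpa [pvGetC, List.getD_eq_getElem?_getD, List.getElem?_eq_getElem h1,
    List.getElem?_eq_getElem h2, List.getElem?_eq_getElem hm1,
    List.getElem?_eq_getElem hm2] using this

theorem pvCardA_length (width height sx sy : Int) (g : List (List Int)) :
    (pvCardA width height sx sy g).length = g.length := by
  unfold pvCardA
  exact pvFold_length _ _ (fun g y _ => pvFold_length _ _ (fun g x _ => pvSetCell_length _ _ _ _) g) g

theorem pvCardA_rowLen (width height sx sy : Int) (g : List (List Int)) (h0sy : 0 ≤ sy)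
    (y' : Int) (hy' : 0 ≤ y') : pvRowLen (pvCardA width height sx sy g) y' = pvRowLen g y' := by
  unfold pvCardA
  refine pvFold_rowLen _ _ (fun g y hy y' hy' => ?_) g y' hy'
  have h0y : 0 ≤ y := by
    have := (PySem.List.mem_pyRange_one.mp hy).1; omega
  exact pvFold_rowLen _ _ (fun g x _ y' hy' => pvRowLen_setCell _ _ _ _ _ h0y hy') g y' hy'

theorem pvCardB_length (width sx sy : Int) (g : List (List Int)) :
    (pvCardB width sx sy g).length = g.length := by
  unfold pvCardB
  rw [pvFold_length _ _ (fun g y _ => by split_ifs <;> simp [pvSetCell_length]),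
    pvFold_length _ _ (fun g x _ => by rw [pvSetCell_length, pvSetCell_length]),
    pvFold_length _ _ (fun g y _ => pvFold_length _ _ (fun g x _ => pvSetCell_length _ _ _ _) g) g]

theorem pvCardB_rowLen (width sx sy : Int) (g : List (List Int)) (h0sy : 0 ≤ sy)
    (y' : Int) (hy' : 0 ≤ y') : pvRowLen (pvCardB width sx sy g) y' = pvRowLen g y' := by
  have h24 : (0:Int) ≤ sy + 24 := by omega
  unfold pvCardB
  rw [pvFold_rowLen _ _ (fun g y hy y' hy' => by
      have h0y : 0 ≤ y := by have := (PySem.List.mem_pyRange_one.mp hy).1; omega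
      split_ifs <;> simp only [pvRowLen_setCell _ _ _ _ _ h0y hy']) _ _ hy',
    pvFold_rowLen _ _ (fun g x _ y' hy' => by
      rw [pvRowLen_setCell _ _ _ _ _ h24 hy', pvRowLen_setCell _ _ _ _ _ h0sy hy']) _ _ hy',
    pvFold_rowLen _ _ (fun g y hy y' hy' => by
      have h0y : 0 ≤ y := by have := (PySem.List.mem_pyRange_one.mp hy).1; omega
      exact pvFold_rowLen _ _ (fun g x _ y' hy' => pvRowLen_setCell _ _ _ _ _ h0y hy') g y' hy') _ _ hy']

theorem pvCard_eq (width height sx sy : Int) (g : List (List Int))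
    (h0sx : 0 ≤ sx) (h0sy : 0 ≤ sy) (hg : sy + 25 < height)
    (hlen : (g.length : Int) = height)
    (hrow : ∀ y, 0 ≤ y → y < height → pvRowLen g y = (width.toNat : Int)) :
    pvCardA width height sx sy g = pvCardB width sx sy g := by
  have hwle : width ≤ (width.toNat : Int) := Int.self_le_toNat width
  have hmin : min (sy + 25) height = sy + 25 := min_eq_left (by omega)
  have hys : ∀ y ∈ PySem.List.pyRange sy (sy + 25) 1, 0 ≤ y ∧ y < (g.length : Int) := by
    intro y hy
    have := PySem.List.mem_pyRange_one.mp hy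
    constructor <;> omega
  have hxs : ∀ y, 0 ≤ y → y < height →
      ∀ x ∈ PySem.List.pyRange sx (min (sx + 25) width) 1, 0 ≤ x ∧ x < pvRowLen g y := by
    intro y h1 h2 x hx
    have := PySem.List.mem_pyRange_one.mp hx
    rw [hrow y h1 h2]
    constructor <;> omega
  apply pvGridExt
  · rw [pvCardA_length, pvCardB_length]
  · intro y' hy'
    rw [pvCardA_rowLen _ _ _ _ _ h0sy _ hy', pvCardB_rowLen _ _ _ _ h0sy _ hy']
  · intro r c hr hc
    unfold pvCardA
    rw [hmin]
    rw [pvRectFold_getC _ _ _ _ _ _ hys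
      (fun y hy => hxs y (hys y hy).1 (by have := (hys y hy).2; omega)) hr hc]
    unfold pvCardB
    simp only []
    -- shapes of the intermediate grids of B
    have rectLen : ∀ g' : List (List Int),
        ((PySem.List.pyRange sy (sy + 25) 1).foldl (fun g y =>
          (PySem.List.pyRange sx (min (sx + 25) width) 1).foldl
            (fun g x => pvSetCell g y x (if y < sy + 10 then (200:Int) else 250)) g) g').length
          = g'.length :=
      fun g' => pvFold_length _ _ (fun g y _ =>
        pvFold_length _ _ (fun g x _ => pvSetCell_length _ _ _ _) g) g'
    have rectRow : ∀ (g' : List (List Int)) (y' : Int), 0 ≤ y' →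
        pvRowLen ((PySem.List.pyRange sy (sy + 25) 1).foldl (fun g y =>
          (PySem.List.pyRange sx (min (sx + 25) width) 1).foldl
            (fun g x => pvSetCell g y x (if y < sy + 10 then (200:Int) else 250)) g) g') y'
          = pvRowLen g' y' := by
      intro g' y' hy'
      refine pvFold_rowLen _ _ (fun g y hy y' hy' => ?_) g' y' hy'
      have h0y : 0 ≤ y := by have := (PySem.List.mem_pyRange_one.mp hy).1; omega
      exact pvFold_rowLen _ _ (fun g x _ y' hy' => pvRowLen_setCell _ _ _ _ _ h0y hy') g y' hy'
    have tbLen : ∀ g' : List (List Int),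
        ((PySem.List.pyRange sx (min (sx + 25) width) 1).foldl (fun g x =>
          pvSetCell (pvSetCell g sy x 150) (sy + 24) x 150) g').length = g'.length :=
      fun g' => pvFold_length _ _ (fun g x _ => by rw [pvSetCell_length, pvSetCell_length]) g'
    have tbRow : ∀ (g' : List (List Int)) (y' : Int), 0 ≤ y' →
        pvRowLen ((PySem.List.pyRange sx (min (sx + 25) width) 1).foldl (fun g x =>
          pvSetCell (pvSetCell g sy x 150) (sy + 24) x 150) g') y' = pvRowLen g' y' := by
      intro g' y' hy'
      exact pvFold_rowLen _ _ (fun g x _ y' hy' => by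
        rw [pvRowLen_setCell _ _ _ _ _ (by omega) hy', pvRowLen_setCell _ _ _ _ _ h0sy hy']) g' y' hy'
    rw [pvColFold_getC _ _ _ _ _ _
      (fun y hy => ⟨(hys y hy).1, by rw [tbLen, rectLen]; exact (hys y hy).2⟩)
      (fun e => ⟨h0sx, fun y hy => by
        rw [tbRow _ _ (hys y hy).1, rectRow _ _ (hys y hy).1,
          hrow y (hys y hy).1 (by have := (hys y hy).2; omega)]
        omega⟩)
      (fun e => ⟨by omega, fun y hy => by
        rw [tbRow _ _ (hys y hy).1, rectRow _ _ (hys y hy).1,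
          hrow y (hys y hy).1 (by have := (hys y hy).2; omega)]
        omega⟩)
      hr hc]
    rw [pvTBFold_getC _ _ _ _ _ h0sy (by rw [rectLen]; omega)
      (fun x hx => by
        have hm := PySem.List.mem_pyRange_one.mp hx
        rw [rectRow _ _ h0sy, rectRow _ _ (by omega : (0:Int) ≤ sy + 24),
          hrow sy h0sy (by omega), hrow (sy + 24) (by omega) (by omega)]
        refine ⟨by omega, by omega, by omega⟩)
      hr hc]
    rw [pvRectFold_getC _ _ _ _ _ _ hys
      (fun y hy => hxs y (hys y hy).1 (by have := (hys y hy).2; omega)) hr hc]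
    simp only [PySem.List.mem_pyRange_one]
    split_ifs <;> omega

theorem pvLoop_eq (width height : Int) :
    ∀ (is : List Int) (g : List (List Int)),
      g.length = height.toNat →
      (∀ y, 0 ≤ y → y < height → pvRowLen g y = (width.toNat : Int)) →
      (∀ i ∈ is, 0 ≤ i) →
      pvLoopA width height is g = pvLoopB width height is g := by
  intro is
  induction is with
  | nil => intro g _ _ _; rfl
  | cons i rest ih =>
    intro g hlen hrow his
    have hi : 0 ≤ i := his i List.mem_cons_self
    have e30 : (25 + 5 : Int) = 30 := by norm_num
    simp only [pvLoopA, pvLoopB, e30]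
    by_cases hguard : 5 + PySem.Int.floordiv i 3 * 30 + 25 ≥ height
    · rw [if_pos hguard, if_pos hguard]
    · rw [if_neg hguard, if_neg hguard]
      have h0sy : 0 ≤ 5 + PySem.Int.floordiv i 3 * 30 := by
        rw [PySem.Int.floordiv_eq_ediv_of_pos (by norm_num)]
        have := Int.ediv_nonneg hi (by norm_num : (0:Int) ≤ 3)
        omega
      have h0sx : 0 ≤ 5 + PySem.Int.mod i 3 * 30 := by
        have := PySem.Int.mod_nonneg i (by norm_num : (0:Int) < 3)
        omega
      have hg : 5 + PySem.Int.floordiv i 3 * 30 + 25 < height := by omega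
      have hlenI : (g.length : Int) = height := by
        rw [hlen]; omega
      rw [pvCard_eq _ _ _ _ _ h0sx h0sy hg hlenI hrow]
      exact ih _ (by rw [pvCardB_length]; exact hlen)
        (fun y h1 h2 => by rw [pvCardB_rowLen _ _ _ _ h0sy _ h1]; exact hrow y h1 h2)
        (fun j hj => his j (List.mem_cons_of_mem _ hj))

-- ===== VERDICT (by name: the statement is the Claim_ definition above) =====
theorem create_card_grid_spec : Claim_equal_create_card_grid := by
  intro width height _
  unfold Spec_create_card_grid create_card_grid create_card_grid_alt
  apply pvLoop_eq
  · exact List.length_replicate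
  · intro y h1 h2
    lift y to ℕ using h1
    have hy : y < height.toNat := by omega
    simp [pvRowLen, List.getD_eq_getElem?_getD, List.getElem?_replicate, hy]
  · intro i hi
    have := (PySem.List.mem_pyRange_one.mp hi).1
    omega
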